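-- pv_equiv track=rewrite | github.com/muromec/erwasm | pycompile.py | parse_beam
-- ===== SOURCE A (Python) =====
-- def parse_beam(text):
--   state = None
--   ret = []
--   sentence = None
--   for symbol in text:
--     if state == None and symbol == '{':
--       state = 'inside'
--       sentence = symbol
--     elif state == 'inside' and symbol == '.':
--       state = None
--       ret.append(sentence)
--       sentence = None
--     elif state == 'inside' and symbol == '"':
--       state = 'inside_literal'
--       sentence += symbol
--     elif state == 'inside_literal' and symbol == '"':
--       state = 'inside'
--       sentence += symbol
--     elif state == 'inside' or state == 'inside_literal':
--       sentence += symbol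
--
--   return ret
-- ===== SOURCE B (Python) =====
-- import re
--
-- # One regex scan instead of a char-by-char FSM.  Each match starts at a '{'
-- # and consumes exactly the region A's machine consumes: quoted literals or
-- # non-'.'/'"' chars, then either a terminating '.' (group 2) or the rest of
-- # the text (unterminated sentence / unclosed literal), so finditer resumes
-- # exactly where A's state resets; only '.'-terminated matches are kept.
-- _SENTENCE = re.compile(r'(\{(?:"[^"]*"|[^."])*)(\.|"[^"]*\Z|\Z)')
--
-- def parse_beam(text):
--   return [m.group(1) for m in _SENTENCE.finditer(text) if m.group(2) == '.']
-- ===== Notes on version B (the rewrite author's own statement) =====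
-- stated objective: faster
-- what changed: Replaced the character-by-character Python state machine (state variable, per-char branches) with a single compiled-regex scan (re.finditer) whose pattern consumes whole quoted literals at once and captures '.'-terminated brace sentences, resuming after each match exactly where the FSM resets.
import Mathlib
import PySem

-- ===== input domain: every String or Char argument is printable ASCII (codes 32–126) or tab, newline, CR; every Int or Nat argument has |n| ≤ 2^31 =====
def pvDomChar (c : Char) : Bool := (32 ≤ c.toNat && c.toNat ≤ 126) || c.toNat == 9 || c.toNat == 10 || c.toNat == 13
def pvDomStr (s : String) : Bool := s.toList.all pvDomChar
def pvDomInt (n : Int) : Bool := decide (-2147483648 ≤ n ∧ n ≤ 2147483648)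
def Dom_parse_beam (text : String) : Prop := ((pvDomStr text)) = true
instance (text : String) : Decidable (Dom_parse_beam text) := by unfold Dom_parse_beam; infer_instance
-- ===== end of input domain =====

-- B replaces A's character-by-character state machine with a single regex-style scan
-- (in Lean: a chunk-wise scanner that consumes quoted literals whole); objective: faster (measured).

-- ===== PORT A =====
-- Literal port of A's for-loop as structural recursion over the same state:
-- state : Option String ∈ {none, "inside", "inside_literal"}, ret, sentence.
-- (Python's sentence is None outside a sentence; sentence.getD [] is only read in
-- branches where Python's sentence is a string, so it is exact there.)
def pvLoopA : List Char → Option String → List (List Char) → Option (List Char) → List (List Char)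
  | [], _, ret, _ => ret
  | c :: cs, state, ret, sentence =>
    if state = none ∧ c = '{' then
      pvLoopA cs (some "inside") ret (some [c])
    else if state = some "inside" ∧ c = '.' then
      pvLoopA cs none (ret ++ [sentence.getD []]) none
    else if state = some "inside" ∧ c = '"' then
      pvLoopA cs (some "inside_literal") ret (some (sentence.getD [] ++ [c]))
    else if state = some "inside_literal" ∧ c = '"' then
      pvLoopA cs (some "inside") ret (some (sentence.getD [] ++ [c]))
    else if state = some "inside" ∨ state = some "inside_literal" then
      pvLoopA cs state ret (some (sentence.getD [] ++ [c]))
    else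
      pvLoopA cs state ret sentence

def parse_beam (text : String) : List String :=
  (pvLoopA text.toList none [] none).map (fun l => String.ofList l)

-- ===== PORT B =====
-- Hand-port of Source B's regex r'(\{(?:"[^"]*"|[^."])*)(\.|"[^"]*\Z|\Z)' scanned with
-- finditer: pvScan looks for the next '{'; pvBody consumes the starred group, taking
-- a whole quoted literal at once (pvLit), and reports the captured group iff the
-- terminator is '.'; finditer resumes after the match (after an unterminated match,
-- i.e. an unclosed literal or end of text, the rest is empty).  The Nat argument is
-- fuel making the recursion structural; any fuel ≥ the remaining length is exact.

-- consume a quoted literal: chars up to the closing '"'; none if it never closes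
def pvLit : List Char → List Char → Option (List Char × List Char)
  | [], _ => none
  | c :: rest, acc => if c = '"' then some (acc, rest) else pvLit rest (acc ++ [c])

-- the starred group + terminator: (some captured, rest) when terminated by '.',
-- (none, []) when the match runs to the end of the text
def pvBody : Nat → List Char → List Char → Option (List Char) × List Char
  | _, [], _ => (none, [])
  | 0, _ :: _, _ => (none, [])
  | fuel + 1, c :: rest, acc =>
    if c = '.' then (some acc, rest)
    else if c = '"' then
      match pvLit rest [] with
      | some (lit, rest') => pvBody fuel rest' (acc ++ '"' :: (lit ++ ['"']))
      | none => (none, [])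
    else pvBody fuel rest (acc ++ [c])

def pvScan : Nat → List Char → List (List Char)
  | _, [] => []
  | 0, _ :: _ => []
  | fuel + 1, c :: rest =>
    if c = '{' then
      match pvBody fuel rest ['{'] with
      | (some s, rest') => s :: pvScan fuel rest'
      | (none, rest') => pvScan fuel rest'
    else pvScan fuel rest

def parse_beam_alt (text : String) : List String :=
  (pvScan text.toList.length text.toList).map (fun l => String.ofList l)

-- ===== PRECONDITION & SPEC =====
def Spec_parse_beam (text : String) (out : List String) : Prop := out = parse_beam_alt text
instance (text : String) (out : List String) : Decidable (Spec_parse_beam text out) := by unfold Spec_parse_beam; infer_instance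

-- ===== CLAIM (what is proved, stated in full; the proofs are below) =====
def Claim_equal_parse_beam : Prop := ∀ (text : String), Dom_parse_beam text → Spec_parse_beam text (parse_beam text)

-- ===== LEMMAS AND PROOFS =====

theorem pvLit_rest_lt : ∀ (cs acc l r : List Char), pvLit cs acc = some (l, r) → r.length < cs.length := by
  intro cs
  induction cs with
  | nil => intro acc l r h; simp [pvLit] at h
  | cons c cs ih =>
    intro acc l r h
    by_cases hc : c = '"'
    · rw [pvLit, if_pos hc] at h
      simp at h
      simp [← h.2]
    · rw [pvLit, if_neg hc] at h
      exact Nat.lt_succ_of_lt (ih _ _ _ h)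

-- accumulator lemma for pvLit
theorem pvLit_acc : ∀ (cs acc : List Char), pvLit cs acc = (pvLit cs []).map (fun p => (acc ++ p.1, p.2)) := by
  intro cs
  induction cs with
  | nil => intro acc; simp [pvLit]
  | cons c cs ih =>
    intro acc
    by_cases hc : c = '"'
    · simp [pvLit, hc]
    · rw [pvLit, if_neg hc, pvLit, if_neg hc, ih (acc ++ [c])]
      simp only [List.nil_append]
      rw [ih [c]]
      cases pvLit cs [] <;> simp

-- when pvBody reports no sentence, the rest of the input is empty
theorem pvBody_none : ∀ (n : Nat) (cs acc r : List Char), pvBody n cs acc = (none, r) → r = [] := by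
  intro n
  induction n with
  | zero => intro cs acc r h; cases cs <;> simp [pvBody] at h <;> exact h
  | succ n ih =>
    intro cs acc r h
    match cs with
    | [] => simp [pvBody] at h; exact h
    | c :: cs =>
      by_cases h1 : c = '.'
      · rw [pvBody, if_pos h1] at h; simp at h
      · by_cases h2 : c = '"'
        · rw [pvBody, if_neg h1, if_pos h2] at h
          cases hl : pvLit cs [] with
          | none => rw [hl] at h; simp at h; exact h
          | some p => rw [hl] at h; exact ih _ _ _ h
        · rw [pvBody, if_neg h1, if_neg h2] at h
          exact ih _ _ _ h

-- A's loop from state 'inside_literal' with sentence s consumes a quoted literal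
theorem loopA_literal : ∀ (cs : List Char) (ret : List (List Char)) (s : List Char),
    pvLoopA cs (some "inside_literal") ret (some s) =
      match pvLit cs [] with
      | some (l, r) => pvLoopA r (some "inside") ret (some (s ++ l ++ ['"']))
      | none => ret := by
  intro cs
  induction cs with
  | nil => intro ret s; simp [pvLoopA, pvLit]
  | cons c cs ih =>
    intro ret s
    by_cases hc : c = '"'
    · subst hc; simp [pvLoopA, pvLit]
    · rw [pvLit, if_neg hc]
      simp only [List.nil_append]
      rw [pvLit_acc cs [c]]
      simp only [pvLoopA, hc]
      norm_num
      rw [ih ret (s ++ [c])]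
      cases pvLit cs [] with
      | none => simp
      | some p => simp

-- A's loop from state 'inside' with sentence s behaves like pvBody
theorem loopA_inside : ∀ (n : Nat) (cs : List Char), cs.length ≤ n → ∀ (ret : List (List Char)) (s : List Char),
    pvLoopA cs (some "inside") ret (some s) =
      match pvBody n cs s with
      | (some out, r) => pvLoopA r none (ret ++ [out]) none
      | (none, _) => ret := by
  intro n
  induction n with
  | zero =>
    intro cs h ret s
    have : cs = [] := List.eq_nil_of_length_eq_zero (Nat.le_zero.mp h)
    subst this
    simp [pvLoopA, pvBody]
  | succ n ih =>
    intro cs hlen ret s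
    match cs with
    | [] => simp [pvLoopA, pvBody]
    | c :: cs =>
      by_cases h1 : c = '.'
      · subst h1; simp [pvLoopA, pvBody]
      · by_cases h2 : c = '"'
        · subst h2
          simp only [pvLoopA]
          norm_num
          rw [loopA_literal cs ret (s ++ ['"'])]
          rw [pvBody]
          norm_num
          cases hl : pvLit cs [] with
          | none => simp
          | some p =>
            obtain ⟨l, r⟩ := p
            have hr : r.length ≤ n := by
              have := pvLit_rest_lt cs [] l r hl
              simp at hlen
              omega
            simp only []
            rw [ih r hr ret (s ++ '"' :: (l ++ ['"']))]
            simp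
        · rw [pvBody, if_neg h1, if_neg h2]
          simp only [pvLoopA, h1, h2]
          norm_num
          exact ih cs (by simp at hlen; omega) ret (s ++ [c])

-- pvBody consumes characters: the rest never grows
theorem pvBody_rest_le : ∀ (n : Nat) (cs acc : List Char), (pvBody n cs acc).2.length ≤ cs.length := by
  intro n
  induction n with
  | zero => intro cs acc; cases cs <;> simp [pvBody]
  | succ n ih =>
    intro cs acc
    match cs with
    | [] => simp [pvBody]
    | c :: cs =>
      by_cases h1 : c = '.'
      · rw [pvBody, if_pos h1]; simp
      · by_cases h2 : c = '"'
        · rw [pvBody, if_neg h1, if_pos h2]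
          cases hl : pvLit cs [] with
          | none => simp
          | some p =>
            obtain ⟨l, r⟩ := p
            calc (pvBody n r (acc ++ '"' :: (l ++ ['"']))).2.length
                ≤ r.length := ih r _
              _ ≤ cs.length + 1 := by
                  have := pvLit_rest_lt cs [] l r hl
                  omega
        · rw [pvBody, if_neg h1, if_neg h2]
          exact Nat.le_succ_of_le (ih cs _)

-- A's loop from state None equals B's scanner
theorem loopA_none : ∀ (n : Nat) (cs : List Char), cs.length ≤ n → ∀ (ret : List (List Char)),
    pvLoopA cs none ret none = ret ++ pvScan n cs := by
  intro n
  induction n with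
  | zero =>
    intro cs h ret
    have : cs = [] := List.eq_nil_of_length_eq_zero (Nat.le_zero.mp h)
    subst this
    simp [pvLoopA, pvScan]
  | succ n ih =>
    intro cs hlen ret
    match cs with
    | [] => simp [pvLoopA, pvScan]
    | c :: cs =>
      by_cases hc : c = '{'
      · subst hc
        simp only [pvLoopA]
        norm_num
        rw [loopA_inside n cs (by simp at hlen; omega) ret ['{']]
        rw [pvScan]
        norm_num
        cases hb : pvBody n cs ['{'] with
        | mk o r =>
          cases o with
          | some out =>
            have hr : r.length ≤ n := by
              have := pvBody_rest_le n cs ['{']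
              rw [hb] at this
              simp at this hlen
              omega
            simp only []
            rw [ih r hr (ret ++ [out])]
            simp
          | none =>
            have : r = [] := pvBody_none n cs ['{'] r hb
            subst this
            simp [pvScan]
      · rw [pvScan, if_neg hc]
        simp only [pvLoopA, hc]
        norm_num
        exact ih cs (by simp at hlen; omega) ret

-- ===== VERDICT (by name: the statement is the Claim_ definition above) =====
theorem parse_beam_spec : Claim_equal_parse_beam := by
  intro text _
  unfold Spec_parse_beam parse_beam parse_beam_alt
  rw [loopA_none text.toList.length text.toList le_rfl []]
  simp
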